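-- pv_equiv track=rewrite | github.com/arthurzkrause/pbn_hunter_bot | main.py | double_ten_successes
-- ===== SOURCE A (Python) =====
-- def double_ten_successes(how_many_tens):
--     #confere dupla de 10 e soma no resultado, já que dois 10 são 4 pontos de sucesso.
--     ten_successes = 0
--     i = 0  # Inicializamos o índice fora do loop para evitar IndexError
--     while i < len(how_many_tens) - 1:
--         if int(how_many_tens[i]) == 10 and int(how_many_tens[i + 1]) == 10:
--             ten_successes += 2
--             i += 2  # Pular para a próxima possível dupla de 10
--         else:
--             i += 1  # Mover para o próximo elemento na lista
--     return ten_successes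
-- ===== SOURCE B (Python) =====
-- def double_ten_successes(how_many_tens):
--     # Run-length scan: each maximal run of L consecutive 10s contributes 2*(L//2).
--     ten_successes = 0
--     run = 0
--     for x in how_many_tens:
--         if int(x) == 10:
--             run += 1
--         else:
--             ten_successes += 2 * (run // 2)
--             run = 0
--     return ten_successes + 2 * (run // 2)
-- ===== Notes on version B (the rewrite author's own statement) =====
-- stated objective: alternative
-- what changed: Replaces the greedy index-jumping while loop (look at a pair, add 2 and skip 2 on a match, else skip 1) with a single direct iteration that run-length-counts consecutive 10s and adds 2*(L//2) per maximal run.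
import Mathlib
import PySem

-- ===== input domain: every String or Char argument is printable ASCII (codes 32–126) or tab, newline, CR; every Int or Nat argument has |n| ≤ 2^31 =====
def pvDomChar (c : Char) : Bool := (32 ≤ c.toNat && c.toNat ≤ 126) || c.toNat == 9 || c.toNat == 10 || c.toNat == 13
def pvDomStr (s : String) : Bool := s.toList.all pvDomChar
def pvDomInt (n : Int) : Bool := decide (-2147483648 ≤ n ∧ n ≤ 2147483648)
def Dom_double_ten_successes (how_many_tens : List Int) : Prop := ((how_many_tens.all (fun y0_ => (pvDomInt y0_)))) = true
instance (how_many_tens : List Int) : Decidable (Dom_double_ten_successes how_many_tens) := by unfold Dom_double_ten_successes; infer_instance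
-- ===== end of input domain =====

-- ===== PORT A =====
-- A: greedy index loop over adjacent pairs; ported as structural recursion on the list
-- (i < len-1 with at least two elements left ↔ the two-cons pattern; skip 2 vs skip 1).
def double_ten_successes_loop : List Int → Int
  | a :: b :: rest =>
      if a = 10 ∧ b = 10 then 2 + double_ten_successes_loop rest
      else double_ten_successes_loop (b :: rest)
  | _ => 0

def double_ten_successes (how_many_tens : List Int) : Int :=
  double_ten_successes_loop how_many_tens

-- ===== PORT B =====
-- B: one pass tracking the length of the current run of 10s; each maximal run of
-- length L contributes 2*(L//2).
def double_ten_successes_alt_loop : List Int → Int → Int → Int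
  | [], run, acc => acc + 2 * PySem.Int.floordiv run 2
  | x :: xs, run, acc =>
      if x = 10 then double_ten_successes_alt_loop xs (run + 1) acc
      else double_ten_successes_alt_loop xs 0 (acc + 2 * PySem.Int.floordiv run 2)

def double_ten_successes_alt (how_many_tens : List Int) : Int :=
  double_ten_successes_alt_loop how_many_tens 0 0

-- ===== PRECONDITION & SPEC =====
def Spec_double_ten_successes (how_many_tens : List Int) (out : Int) : Prop := out = double_ten_successes_alt how_many_tens
instance (how_many_tens : List Int) (out : Int) : Decidable (Spec_double_ten_successes how_many_tens out) := by unfold Spec_double_ten_successes; infer_instance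

-- ===== CLAIM (what is proved, stated in full; the proofs are below) =====
def Claim_equal_double_ten_successes : Prop := ∀ (how_many_tens : List Int), Dom_double_ten_successes how_many_tens → Spec_double_ten_successes how_many_tens (double_ten_successes how_many_tens)

-- ===== LEMMAS AND PROOFS =====

-- ===== VERDICT (by name: the statement is the Claim_ definition above) =====
lemma loopA_skip (x : Int) (hx : x ≠ 10) (l : List Int) :
    double_ten_successes_loop (x :: l) = double_ten_successes_loop l := by
  cases l with
  | nil => rfl
  | cons b r => simp [double_ten_successes_loop, hx]

lemma two_mul_fd (n : Nat) : 2 * PySem.Int.floordiv (n : Int) 2 = (n : Int) - (n % 2 : Nat) := by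
  rw [PySem.Int.floordiv_eq_ediv_of_pos (by omega : (0:Int) < 2)]
  omega

lemma loopB_state (l : List Int) : ∀ (n : Nat) (acc : Int),
    double_ten_successes_alt_loop l (n : Int) acc =
      acc + (n : Int) - (n % 2 : Nat) +
        double_ten_successes_loop (List.replicate (n % 2) 10 ++ l) := by
  induction l with
  | nil =>
      intro n acc
      simp only [double_ten_successes_alt_loop, two_mul_fd]
      rcases Nat.mod_two_eq_zero_or_one n with h | h
      · simp [h, double_ten_successes_loop]
      · simp [h, double_ten_successes_loop]; ring
  | cons x xs ih =>
      intro n acc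
      by_cases hx : x = 10
      · subst hx
        simp only [double_ten_successes_alt_loop]
        have h1 : ((n : Int) + 1) = ((n + 1 : Nat) : Int) := by push_cast; ring
        rw [h1, ih (n + 1) acc]
        rcases Nat.even_or_odd n with h | h
        · have h2 : n % 2 = 0 := Nat.even_iff.mp h
          have h3 : (n + 1) % 2 = 1 := by omega
          simp [h2, h3]
          push_cast; ring_nf
        · have h2 : n % 2 = 1 := Nat.odd_iff.mp h
          have h3 : (n + 1) % 2 = 0 := by omega
          simp [h2, h3, double_ten_successes_loop]
          ring
      · simp only [double_ten_successes_alt_loop, if_neg hx, two_mul_fd]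
        have h0 : ((0 : Nat) : Int) = (0 : Int) := rfl
        rw [← h0, ih 0]
        have : double_ten_successes_loop (List.replicate (n % 2) 10 ++ x :: xs)
            = double_ten_successes_loop xs := by
          rcases Nat.mod_two_eq_zero_or_one n with h | h
          · simp only [h, List.replicate, List.nil_append]
            exact loopA_skip x hx xs
          · simp only [h, List.replicate, List.nil_append, List.cons_append,
              double_ten_successes_loop]
            rw [if_neg (by tauto)]
            exact loopA_skip x hx xs
        rw [this]
        simp; ring

-- ===== VERDICT (by name: the statement is the Claim_ definition above) =====
theorem double_ten_successes_spec : Claim_equal_double_ten_successes := by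
  intro l _
  unfold Spec_double_ten_successes double_ten_successes double_ten_successes_alt
  have h := loopB_state l 0 0
  simpa using h.symm
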